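-- pv_equiv track=rewrite | github.com/satyam8254/Python-program | python-code/beautifulString.py | beautifulString
-- ===== SOURCE A (Python) =====
-- from collections import defaultdict
--
-- def beautifulString(s):
--     ca,cb,cc=0,0,0
--     d=defaultdict(int)
--     d[0,0]=1
--     res=0
--     for i in s:
--         if i=='a':
--             ca=ca+1
--         elif i=='b':
--             cb=cb+1
--         elif i=='c':
--             cc=cc+1
--         b=(ca-cb,ca-cc)
--         res=res+d[b]
--         d[b]=d[b]+1
--     return res
-- ===== SOURCE B (Python) =====
-- def beautifulString(s):
--     res = 0
--     for i in range(len(s)):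
--         ca = cb = cc = 0
--         for ch in s[i:]:
--             if ch == 'a':
--                 ca += 1
--             elif ch == 'b':
--                 cb += 1
--             elif ch == 'c':
--                 cc += 1
--             if ca == cb == cc:
--                 res += 1
--     return res
-- ===== Notes on version B (the rewrite author's own statement) =====
-- stated objective: simpler
-- what changed: Replaced the prefix-difference hashmap (defaultdict keyed by (ca-cb,ca-cc)) with a direct brute-force double loop that, for each start index, extends running a/b/c counts and counts substrings where the three counts are equal.
import Mathlib
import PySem

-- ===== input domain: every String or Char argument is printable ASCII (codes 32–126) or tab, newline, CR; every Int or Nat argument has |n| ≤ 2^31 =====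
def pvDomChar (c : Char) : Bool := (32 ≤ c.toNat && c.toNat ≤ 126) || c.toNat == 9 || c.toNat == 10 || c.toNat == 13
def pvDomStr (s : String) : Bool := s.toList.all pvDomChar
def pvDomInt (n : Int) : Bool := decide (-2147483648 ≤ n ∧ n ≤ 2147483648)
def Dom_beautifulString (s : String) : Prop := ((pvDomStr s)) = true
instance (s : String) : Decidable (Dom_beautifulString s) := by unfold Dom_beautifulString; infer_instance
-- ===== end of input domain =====

-- B replaces A's one-pass prefix-difference hashmap by a plainer brute-force double loop over
-- substrings (simpler, no dict; not faster).

-- ===== PORT A =====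
-- loop body of A: elif chain updating ca/cb/cc, then key b=(ca-cb,ca-cc), res += d[b], d[b] += 1
def bsStep (acc : Int × Int × Int × PySem.Dict (Int × Int) Int × Int) (i : Char) :
    Int × Int × Int × PySem.Dict (Int × Int) Int × Int :=
  match acc with
  | (ca, cb, cc, d, res) =>
    let s : Int × Int × Int :=
      if i = 'a' then (ca + 1, cb, cc)
      else if i = 'b' then (ca, cb + 1, cc)
      else if i = 'c' then (ca, cb, cc + 1)
      else (ca, cb, cc)
    let b : Int × Int := (s.1 - s.2.1, s.1 - s.2.2)
    (s.1, s.2.1, s.2.2, d.insert b (d.getD b 0 + 1), res + d.getD b 0)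

def beautifulString (s : String) : Int :=
  (s.toList.foldl bsStep (0, 0, 0, PySem.Dict.empty.insert ((0 : Int), (0 : Int)) 1, 0)).2.2.2.2

-- ===== PORT B =====
-- inner-loop body of B: classify one character of the substring, bump the matching counter,
-- count the position when ca == cb == cc
def bsScan (acc : Int × Int × Int × Int) (ch : Char) : Int × Int × Int × Int :=
  match acc with
  | (ca, cb, cc, res) =>
    let s : Int × Int × Int :=
      if ch = 'a' then (ca + 1, cb, cc)
      else if ch = 'b' then (ca, cb + 1, cc)
      else if ch = 'c' then (ca, cb, cc + 1)
      else (ca, cb, cc)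
    (s.1, s.2.1, s.2.2, if s.1 = s.2.1 ∧ s.2.1 = s.2.2 then res + 1 else res)

-- for ch in s[i:]: iterating a Python string slice = iterating the chars of the list slice
def beautifulString_alt (s : String) : Int :=
  (PySem.List.pyRange 0 (s.toList.length : Int) 1).foldl
    (fun res i =>
      ((PySem.List.slice s.toList (some i) none).foldl bsScan (0, 0, 0, res)).2.2.2)
    0

-- ===== PRECONDITION & SPEC =====
def Spec_beautifulString (s : String) (out : Int) : Prop := out = beautifulString_alt s
instance (s : String) (out : Int) : Decidable (Spec_beautifulString s out) := by unfold Spec_beautifulString; infer_instance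

-- ===== CLAIM (what is proved, stated in full; the proofs are below) =====
def Claim_equal_beautifulString : Prop := ∀ (s : String), Dom_beautifulString s → Spec_beautifulString s (beautifulString s)

-- ===== LEMMAS AND PROOFS =====

-- abstract single-character update of the (ca, cb, cc) counters
def pvStep (st : Int × Int × Int) (c : Char) : Int × Int × Int :=
  if c = 'a' then (st.1 + 1, st.2.1, st.2.2)
  else if c = 'b' then (st.1, st.2.1 + 1, st.2.2)
  else if c = 'c' then (st.1, st.2.1, st.2.2 + 1)
  else st

def pvKey (st : Int × Int × Int) : Int × Int := (st.1 - st.2.1, st.1 - st.2.2)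

-- keys of ALL prefixes (incl. the empty one) starting from state st
def pvKeys (st : Int × Int × Int) : List Char → List (Int × Int)
  | [] => [pvKey st]
  | c :: t => pvKey st :: pvKeys (pvStep st c) t

-- keys of the NONEMPTY prefixes
def pvTail (st : Int × Int × Int) : List Char → List (Int × Int)
  | [] => []
  | c :: t => pvKey (pvStep st c) :: pvTail (pvStep st c) t

-- number of equal pairs in a list: Σ over positions p of #later positions with the same value
def pvPairs : List (Int × Int) → Int
  | [] => 0
  | k :: r => (r.count k : Int) + pvPairs r

-- what A's loop accumulates: at each new prefix key, the number of earlier equal keys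
def pvPL (seen : List (Int × Int)) (st : Int × Int × Int) : List Char → Int
  | [] => 0
  | c :: t => (seen.count (pvKey (pvStep st c)) : Int)
      + pvPL (seen ++ [pvKey (pvStep st c)]) (pvStep st c) t

-- what B's inner loop accumulates: balanced nonempty prefixes
def pvBal (st : Int × Int × Int) : List Char → Int
  | [] => 0
  | c :: t => (if pvKey (pvStep st c) = ((0 : Int), (0 : Int)) then 1 else 0) + pvBal (pvStep st c) t

def add3 (st d : Int × Int × Int) : Int × Int × Int := (st.1 + d.1, st.2.1 + d.2.1, st.2.2 + d.2.2)

theorem pvKeys_eq_cons (st : Int × Int × Int) (t : List Char) :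
    pvKeys st t = pvKey st :: pvTail st t := by
  induction t generalizing st with
  | nil => rfl
  | cons c t ih => simp [pvKeys, pvTail, ih]

theorem pvStep_add (st d : Int × Int × Int) (c : Char) :
    pvStep (add3 st d) c = add3 st (pvStep d c) := by
  simp only [pvStep]; split_ifs <;> simp [add3] <;> omega

theorem pvKey_add_eq_iff (st d : Int × Int × Int) :
    pvKey (add3 st d) = pvKey st ↔ pvKey d = ((0 : Int), (0 : Int)) := by
  simp only [pvKey, add3, Prod.mk.injEq]; omega

theorem add3_zero (st : Int × Int × Int) : add3 st (0, 0, 0) = st := by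
  simp [add3]

-- ---- A side ----

theorem pvPairs_append_singleton (xs : List (Int × Int)) (k : Int × Int) :
    pvPairs (xs ++ [k]) = pvPairs xs + (xs.count k : Int) := by
  induction xs with
  | nil => simp [pvPairs]
  | cons x xs ih =>
      simp only [List.cons_append, pvPairs, ih, List.count_append, List.count_cons,
        List.count_nil]
      rcases eq_or_ne k x with h | h
      · simp [h]; ring
      · have h' : ¬ (x == k) := by simpa using fun hh => h hh.symm
        simp [h, h']; ring

theorem pvPL_eq (t : List Char) : ∀ (st : Int × Int × Int) (seen : List (Int × Int)),
    pvPL seen st t + pvPairs seen = pvPairs (seen ++ pvTail st t) := by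
  induction t with
  | nil => intro st seen; simp [pvPL, pvTail]
  | cons c t ih =>
      intro st seen
      have h := ih (pvStep st c) (seen ++ [pvKey (pvStep st c)])
      have h2 := pvPairs_append_singleton seen (pvKey (pvStep st c))
      have h3 : seen ++ pvTail st (c :: t)
          = (seen ++ [pvKey (pvStep st c)]) ++ pvTail (pvStep st c) t := by
        simp [pvTail]
      rw [h3]
      simp only [pvPL] at *
      omega

theorem bsStep_eq (ca cb cc : Int) (d : PySem.Dict (Int × Int) Int) (res : Int) (i : Char) :
    bsStep (ca, cb, cc, d, res) i =
      ((pvStep (ca, cb, cc) i).1, (pvStep (ca, cb, cc) i).2.1, (pvStep (ca, cb, cc) i).2.2,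
        d.insert (pvKey (pvStep (ca, cb, cc) i)) (d.getD (pvKey (pvStep (ca, cb, cc) i)) 0 + 1),
        res + d.getD (pvKey (pvStep (ca, cb, cc) i)) 0) := by
  simp only [bsStep, pvStep, pvKey]

theorem afold_eq (t : List Char) :
    ∀ (ca cb cc : Int) (d : PySem.Dict (Int × Int) Int) (res : Int) (seen : List (Int × Int)),
    (∀ k, d.getD k 0 = (seen.count k : Int)) →
    (t.foldl bsStep (ca, cb, cc, d, res)).2.2.2.2 = res + pvPL seen (ca, cb, cc) t := by
  induction t with
  | nil => intro ca cb cc d res seen _; simp [pvPL]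
  | cons c t ih =>
      intro ca cb cc d res seen hd
      have hb := hd (pvKey (pvStep (ca, cb, cc) c))
      rw [List.foldl_cons, bsStep_eq]
      set st' := pvStep (ca, cb, cc) c with hst'
      have hst3 : st' = (st'.1, st'.2.1, st'.2.2) := rfl
      rw [ih st'.1 st'.2.1 st'.2.2 _ _ (seen ++ [pvKey st'])
        (by
          intro k
          rcases eq_or_ne k (pvKey st') with h | h
          · subst h
            rw [PySem.Dict.getD_insert_self]
            simp [List.count_append, hb]
          · rw [PySem.Dict.getD_insert_of_ne _ _ _ h, hd k]
            have : [pvKey st'].count k = 0 := by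
              simp [List.count_singleton]
              simpa using fun hh => h hh.symm
            simp [List.count_append, this])]
      simp only [pvPL, ← hst', hb, Prod.mk.eta]
      omega

theorem a_eq_pairs (l : List Char) :
    (l.foldl bsStep (0, 0, 0, PySem.Dict.empty.insert ((0 : Int), (0 : Int)) 1, 0)).2.2.2.2
      = pvPairs (pvKeys (0, 0, 0) l) := by
  have hd : ∀ k : Int × Int,
      (PySem.Dict.empty.insert ((0 : Int), (0 : Int)) 1).getD k 0
        = (([((0 : Int), (0 : Int))].count k : Nat) : Int) := by
    intro k
    rcases eq_or_ne k ((0 : Int), (0 : Int)) with h | h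
    · subst h; rw [PySem.Dict.getD_insert_self]; simp
    · rw [PySem.Dict.getD_insert_of_ne _ _ _ h]
      have : [((0 : Int), (0 : Int))].count k = 0 := by
        simp [List.count_singleton]
        simpa using fun hh => h hh.symm
      simp [this, PySem.Dict.getD_empty]
  rw [afold_eq l 0 0 0 _ 0 [((0 : Int), (0 : Int))] hd]
  have hk : pvKey ((0 : Int), (0 : Int), (0 : Int)) = ((0 : Int), (0 : Int)) := by
    simp [pvKey]
  have h := pvPL_eq l ((0 : Int), (0 : Int), (0 : Int)) [((0 : Int), (0 : Int))]
  have h1 : pvPairs [((0 : Int), (0 : Int))] = 0 := by simp [pvPairs]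
  have h2 : ([((0 : Int), (0 : Int))] ++ pvTail ((0 : Int), (0 : Int), (0 : Int)) l)
      = pvKeys ((0 : Int), (0 : Int), (0 : Int)) l := by
    rw [pvKeys_eq_cons, hk]; rfl
  rw [h2, h1] at h
  omega

-- ---- B side ----

theorem ballCond (s : Int × Int × Int) :
    (s.1 = s.2.1 ∧ s.2.1 = s.2.2) ↔ pvKey s = ((0 : Int), (0 : Int)) := by
  simp only [pvKey, Prod.mk.injEq]; omega

theorem bfold_eq (t : List Char) : ∀ (a b c res : Int),
    (t.foldl bsScan (a, b, c, res)).2.2.2 = res + pvBal (a, b, c) t := by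
  induction t with
  | nil => intro a b c res; simp [pvBal]
  | cons ch t ih =>
      intro a b c res
      have hscan : bsScan (a, b, c, res) ch =
          ((pvStep (a, b, c) ch).1, (pvStep (a, b, c) ch).2.1, (pvStep (a, b, c) ch).2.2,
            if pvKey (pvStep (a, b, c) ch) = ((0 : Int), (0 : Int)) then res + 1 else res) := by
        have hite : ∀ (p : Int × Int × Int) (x y : Int),
            (if p.1 = p.2.1 ∧ p.2.1 = p.2.2 then x else y)
              = (if pvKey p = ((0 : Int), (0 : Int)) then x else y) := by
          intro p x y; exact if_congr (ballCond p) rfl rfl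
        simp only [bsScan, pvStep, hite]
      rw [List.foldl_cons, hscan]
      set st' := pvStep (a, b, c) ch with hst'
      rw [ih st'.1 st'.2.1 st'.2.2]
      simp only [pvBal, ← hst', Prod.mk.eta]
      split_ifs <;> omega

theorem balCount (t : List Char) : ∀ (st d : Int × Int × Int),
    pvBal d t = ((pvTail (add3 st d) t).count (pvKey st) : Int) := by
  induction t with
  | nil => intro st d; simp [pvBal, pvTail]
  | cons c t ih =>
      intro st d
      simp only [pvBal, pvTail, pvStep_add, List.count_cons, ih st (pvStep d c)]
      simp only [beq_iff_eq, pvKey_add_eq_iff]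
      by_cases hk : pvKey (pvStep d c) = ((0 : Int), (0 : Int))
      · simp [hk]; omega
      · simp [hk]

theorem pvKeys_add (t : List Char) : ∀ (st d : Int × Int × Int),
    pvKeys (add3 st d) t = (pvKeys d t).map (fun q => (q.1 + (pvKey st).1, q.2 + (pvKey st).2)) := by
  induction t with
  | nil =>
      intro st d
      simp only [pvKeys, List.map_cons, List.map_nil, List.cons.injEq, and_true]
      simp [pvKey, add3, Prod.ext_iff]; omega
  | cons c t ih =>
      intro st d
      simp only [pvKeys, pvStep_add, List.map_cons, ih st (pvStep d c), List.cons.injEq, and_true]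
      simp [pvKey, add3, Prod.ext_iff]; omega

theorem pvPairs_map_add (K : List (Int × Int)) (a : Int × Int) :
    pvPairs (K.map (fun q => (q.1 + a.1, q.2 + a.2))) = pvPairs K := by
  have hinj : Function.Injective (fun q : Int × Int => (q.1 + a.1, q.2 + a.2)) := by
    intro x y h
    simp only [Prod.mk.injEq] at h
    exact Prod.ext (by omega) (by omega)
  induction K with
  | nil => rfl
  | cons k K ih =>
      simp only [List.map_cons, pvPairs, ih, List.count_map_of_injective _ _ hinj]

theorem sum_bal_eq (l : List Char) :
    (((List.range l.length).map (fun k => pvBal (0, 0, 0) (l.drop k))).sum : Int)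
      = pvPairs (pvKeys (0, 0, 0) l) := by
  induction l with
  | nil => simp [pvKeys, pvPairs]
  | cons c t ih =>
      rw [List.length_cons, List.range_succ_eq_map]
      simp only [List.map_cons, List.map_map, List.sum_cons, Function.comp_def,
        Nat.succ_eq_add_one, List.drop_succ_cons, List.drop_zero]
      rw [ih]
      -- head term: pvBal z (c::t) counts pvKey z in pvTail z (c::t) = pvKeys (pvStep z c) t
      have hhead : pvBal ((0 : Int), (0 : Int), (0 : Int)) (c :: t)
          = ((pvKeys (pvStep (0, 0, 0) c) t).count (pvKey ((0 : Int), (0 : Int), (0 : Int))) : Int) := by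
        have h := balCount (c :: t) ((0 : Int), (0 : Int), (0 : Int)) ((0 : Int), (0 : Int), (0 : Int))
        have hz : add3 ((0 : Int), (0 : Int), (0 : Int)) ((0 : Int), (0 : Int), (0 : Int))
            = ((0 : Int), (0 : Int), (0 : Int)) := by simp [add3]
        rw [hz] at h
        rw [h]
        rw [show pvTail ((0 : Int), (0 : Int), (0 : Int)) (c :: t)
            = pvKeys (pvStep (0, 0, 0) c) t from by rw [pvKeys_eq_cons]; simp [pvTail]]
      -- tail invariance: pvPairs (pvKeys (pvStep z c) t) = pvPairs (pvKeys z t)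
      have htail : pvPairs (pvKeys (pvStep (0, 0, 0) c) t)
          = pvPairs (pvKeys ((0 : Int), (0 : Int), (0 : Int)) t) := by
        have h := pvKeys_add t (pvStep (0, 0, 0) c) ((0 : Int), (0 : Int), (0 : Int))
        rw [add3_zero] at h
        rw [h, pvPairs_map_add]
      conv_rhs => rw [show pvKeys ((0 : Int), (0 : Int), (0 : Int)) (c :: t)
        = pvKey ((0 : Int), (0 : Int), (0 : Int)) :: pvKeys (pvStep (0, 0, 0) c) t from rfl]
      simp only [pvPairs]
      omega

theorem b_eq_pairs (l : List Char) :
    (PySem.List.pyRange 0 (l.length : Int) 1).foldl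
      (fun res i => ((PySem.List.slice l (some i) none).foldl bsScan (0, 0, 0, res)).2.2.2) 0
      = pvPairs (pvKeys (0, 0, 0) l) := by
  simp only [bfold_eq]
  rw [PySem.List.foldl_add]
  rw [PySem.List.pyRange_one, List.map_map]
  simp only [Function.comp_def, zero_add, Int.sub_zero, Int.toNat_natCast,
    PySem.List.slice_from_natCast]
  rw [sum_bal_eq]

-- ===== VERDICT (by name: the statement is the Claim_ definition above) =====
theorem beautifulString_spec : Claim_equal_beautifulString := by
  intro s _
  show beautifulString s = beautifulString_alt s
  unfold beautifulString beautifulString_alt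
  rw [a_eq_pairs, b_eq_pairs]
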